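-- pv_equiv track=rewrite | github.com/binhyc11/MIT-course | ps2 - Hangman with hints.py | unique_letter
-- ===== SOURCE A (Python) =====
-- import string
--
-- def unique_letter (secret_word):
--     '''
--     Input: secret_word
--     Return: number of unique letters, unique letters list
--     '''
--     number_unique = 0
--     unique = []
--     for i in string.ascii_lowercase:
--         if i in secret_word:
--             number_unique += 1
--             unique.append(i)
--     return number_unique, unique
-- ===== SOURCE B (Python) =====
-- import string
--
--
-- def unique_letter(secret_word):
--     unique = sorted(set(secret_word) & set(string.ascii_lowercase))
--     return len(unique), unique
-- ===== Notes on version B (the rewrite author's own statement) =====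
-- stated objective: idiomatic
-- what changed: Replaces the 26-step alphabet scan with substring tests by building the set of the word's characters once, intersecting with the lowercase alphabet and sorting it.
import Mathlib
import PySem

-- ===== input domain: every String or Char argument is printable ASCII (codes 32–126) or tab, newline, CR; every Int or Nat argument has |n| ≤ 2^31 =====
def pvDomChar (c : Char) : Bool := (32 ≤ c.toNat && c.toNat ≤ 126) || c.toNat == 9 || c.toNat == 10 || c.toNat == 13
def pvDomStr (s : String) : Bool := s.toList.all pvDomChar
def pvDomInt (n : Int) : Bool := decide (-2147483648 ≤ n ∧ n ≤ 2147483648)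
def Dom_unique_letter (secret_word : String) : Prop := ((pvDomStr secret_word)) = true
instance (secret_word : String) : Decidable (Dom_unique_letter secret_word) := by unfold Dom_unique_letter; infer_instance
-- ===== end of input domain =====

-- B replaces A's scan over the alphabet (substring test per letter) by set-of-word ∩ alphabet, sorted: idiomatic, one pass over the word.

-- string.ascii_lowercase
def pyAsciiLowercase : List Char := "abcdefghijklmnopqrstuvwxyz".toList

-- ===== PORT A =====
def unique_letter (secret_word : String) : Int × List String :=
  let r := pyAsciiLowercase.foldl
    (fun (st : Int × List String) i =>
      if PySem.Str.isIn i.toString secret_word then (st.1 + 1, st.2 ++ [i.toString]) else st)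
    ((0 : Int), ([] : List String))
  r

-- ===== PORT B =====
-- Python's one-char strings are modelled as Char for the set and the sort (exact: for
-- single ASCII characters string order = character order), mapped to String per the type convention.
def unique_letter_alt (secret_word : String) : Int × List String :=
  let unique := PySem.List.sorted
    (PySem.Set.inter (PySem.Set.ofList secret_word.toList) pyAsciiLowercase) (fun x => x) false
  ((unique.length : Int), unique.map Char.toString)

-- ===== PRECONDITION & SPEC =====
def Spec_unique_letter (secret_word : String) (out : Int × List String) : Prop := out = unique_letter_alt secret_word
instance (secret_word : String) (out : Int × List String) : Decidable (Spec_unique_letter secret_word out) := by unfold Spec_unique_letter; infer_instance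

-- ===== CLAIM (what is proved, stated in full; the proofs are below) =====
def Claim_equal_unique_letter : Prop := ∀ (secret_word : String), Dom_unique_letter secret_word → Spec_unique_letter secret_word (unique_letter secret_word)

-- ===== LEMMAS AND PROOFS =====

-- a one-character substring test is a character-membership test
theorem single_infix (c : Char) (l : List Char) : [c] <:+: l ↔ c ∈ l := by
  constructor
  · intro h; exact (List.singleton_sublist).1 h.sublist
  · intro h; obtain ⟨s, t, rfl⟩ := List.append_of_mem h; exact ⟨s, t, by simp⟩

theorem isIn_toString_eq (w : String) (c : Char) :
    PySem.Str.isIn c.toString w = decide (c ∈ w.toList) := by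
  by_cases h : c ∈ w.toList
  · simp only [h, decide_true]
    rw [PySem.Str.isIn_iff_infix]
    simpa [Char.toString] using (single_infix c w.toList).2 h
  · simp only [h, decide_false]
    rw [← Bool.not_eq_true, PySem.Str.isIn_iff_infix]
    simpa [Char.toString] using fun hh => h ((single_infix c w.toList).1 hh)

theorem fold_spec (w : String) (l : List Char) (n : Int) (acc : List String) :
    l.foldl
      (fun (st : Int × List String) i =>
        if PySem.Str.isIn i.toString w then (st.1 + 1, st.2 ++ [i.toString]) else st)
      (n, acc)
    = (n + ((l.filter (fun c => decide (c ∈ w.toList))).length : Int),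
       acc ++ (l.filter (fun c => decide (c ∈ w.toList))).map Char.toString) := by
  induction l generalizing n acc with
  | nil => simp
  | cons c l ih =>
    simp only [List.foldl_cons, List.filter_cons]
    rw [isIn_toString_eq]
    by_cases h : c ∈ w.toList
    · simp only [h, decide_true, if_true, ih, List.length_cons, List.map_cons]
      refine Prod.ext ?_ (by simp)
      push_cast; ring
    · simp only [h, decide_false, if_false, ih, Bool.false_eq_true]

theorem sorted_inter_eq (w : String) :
    PySem.List.sorted
      (PySem.Set.inter (PySem.Set.ofList w.toList) pyAsciiLowercase) (fun x => x) false
    = pyAsciiLowercase.filter (fun c => decide (c ∈ w.toList)) := by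
  apply PySem.List.sorted_eq_of_perm_of_pairwise_lt
  · apply (List.perm_ext_iff_of_nodup ?_ ?_).2
    · intro x
      simp [PySem.Set.mem_inter, PySem.Set.mem_ofList, List.mem_filter, and_comm]
    · exact (by decide : pyAsciiLowercase.Nodup).filter _
    · exact PySem.Set.nodup_inter _ _ (PySem.Set.nodup_ofList _)
  · exact (by decide : pyAsciiLowercase.Pairwise (· < ·)).filter _

-- ===== VERDICT (by name: the statement is the Claim_ definition above) =====
theorem unique_letter_spec : Claim_equal_unique_letter := by
  intro w _
  show unique_letter w = unique_letter_alt w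
  simp only [unique_letter, unique_letter_alt, sorted_inter_eq, fold_spec]
  simp
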